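-- pv_equiv track=rewrite | github.com/marisaroude/Crossfading | ej_paralela_mpi.py | compute_sendcounts_displs
-- ===== SOURCE A (Python) =====
-- from typing import Tuple
--
-- def compute_sendcounts_displs(height: int, width: int, nproc: int, channels: int = 3) -> Tuple[list, list]:
--     rows_per = height // nproc
--     rem = height % nproc
--     sendcounts = [] #cantidad de bytes a cada proceso
--     displs = [] #displacements
--     offset = 0
--     for i in range(nproc):
--         rows = rows_per + (1 if i < rem else 0)
--         cnt = rows * width * channels
--         sendcounts.append(cnt)
--         displs.append(offset)
--         offset += cnt
--     return sendcounts, displs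
-- ===== SOURCE B (Python) =====
-- def compute_sendcounts_displs(height: int, width: int, nproc: int, channels: int = 3):
--     rows_per = height // nproc
--     rem = height % nproc
--     sendcounts = [(rows_per + (1 if i < rem else 0)) * width * channels
--                   for i in range(nproc)]
--     displs = [(i * rows_per + min(i, rem)) * width * channels
--               for i in range(nproc)]
--     return sendcounts, displs
-- ===== Notes on version B (the rewrite author's own statement) =====
-- stated objective: simpler
-- what changed: Replaced the sequential loop that appends to both lists while maintaining a running offset with two comprehensions: each displacement is computed directly by the closed form (i*rows_per + min(i, rem))*width*channels, so no accumulated state is carried between iterations.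
import Mathlib
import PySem

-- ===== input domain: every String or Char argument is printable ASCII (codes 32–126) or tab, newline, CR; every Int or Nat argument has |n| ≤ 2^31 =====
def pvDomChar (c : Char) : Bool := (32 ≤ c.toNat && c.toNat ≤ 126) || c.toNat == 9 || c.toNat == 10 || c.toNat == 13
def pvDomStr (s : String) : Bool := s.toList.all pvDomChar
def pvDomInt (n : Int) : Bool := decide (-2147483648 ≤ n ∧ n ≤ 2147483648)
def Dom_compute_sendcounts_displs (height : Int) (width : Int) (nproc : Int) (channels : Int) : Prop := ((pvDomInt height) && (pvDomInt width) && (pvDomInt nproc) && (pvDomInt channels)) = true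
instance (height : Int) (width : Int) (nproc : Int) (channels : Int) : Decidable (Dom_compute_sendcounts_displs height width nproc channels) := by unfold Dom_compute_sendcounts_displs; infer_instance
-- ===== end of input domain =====

-- B replaces A's running-offset loop with two comprehensions and a closed-form
-- displacement (i*rows_per + min i rem)*width*channels (objective: simpler).

-- ===== PORT A =====
def compute_sendcounts_displs (height : Int) (width : Int) (nproc : Int) (channels : Int) : List Int × List Int :=
  let rows_per := PySem.Int.floordiv height nproc
  let rem := PySem.Int.mod height nproc
  let st := (PySem.List.pyRange 0 nproc 1).foldl
    (fun (st : List Int × List Int × Int) i =>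
      let rows := rows_per + (if i < rem then (1 : Int) else 0)
      let cnt := rows * width * channels
      (st.1 ++ [cnt], st.2.1 ++ [st.2.2], st.2.2 + cnt))
    ([], [], 0)
  (st.1, st.2.1)

-- ===== PORT B =====
def compute_sendcounts_displs_alt (height : Int) (width : Int) (nproc : Int) (channels : Int) : List Int × List Int :=
  let rows_per := PySem.Int.floordiv height nproc
  let rem := PySem.Int.mod height nproc
  ((PySem.List.pyRange 0 nproc 1).map (fun i => (rows_per + (if i < rem then (1 : Int) else 0)) * width * channels),
   (PySem.List.pyRange 0 nproc 1).map (fun i => (i * rows_per + min i rem) * width * channels))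

-- ===== PRECONDITION & SPEC =====
-- Python raises ZeroDivisionError on nproc = 0 (height // nproc); excluded.
def Pre_compute_sendcounts_displs (height : Int) (width : Int) (nproc : Int) (channels : Int) : Prop := nproc ≠ 0
instance (height : Int) (width : Int) (nproc : Int) (channels : Int) : Decidable (Pre_compute_sendcounts_displs height width nproc channels) := by unfold Pre_compute_sendcounts_displs; infer_instance
def pvWitness_compute_sendcounts_displs : Int × Int × Int × Int := (10, 4, 3, 3)

def Spec_compute_sendcounts_displs (height : Int) (width : Int) (nproc : Int) (channels : Int) (out : List Int × List Int) : Prop := out = compute_sendcounts_displs_alt height width nproc channels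
instance (height : Int) (width : Int) (nproc : Int) (channels : Int) (out : List Int × List Int) : Decidable (Spec_compute_sendcounts_displs height width nproc channels out) := by unfold Spec_compute_sendcounts_displs; infer_instance

-- ===== CLAIM (what is proved, stated in full; the proofs are below) =====
def Claim_equal_compute_sendcounts_displs : Prop := ∀ (height : Int) (width : Int) (nproc : Int) (channels : Int), Dom_compute_sendcounts_displs height width nproc channels → Pre_compute_sendcounts_displs height width nproc channels → Spec_compute_sendcounts_displs height width nproc channels (compute_sendcounts_displs height width nproc channels)

-- ===== LEMMAS AND PROOFS =====

-- Loop invariant: after folding range(0, m), A's state holds exactly B's two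
-- comprehensions over the same range, and the running offset equals B's
-- closed-form displacement for index m.
theorem pv_fold_invariant (rows_per rem w c : Int) (hrem : 0 ≤ rem) (m : Nat) :
    (PySem.List.pyRange 0 (m : Int) 1).foldl
      (fun (st : List Int × List Int × Int) i =>
        let rows := rows_per + (if i < rem then (1 : Int) else 0)
        let cnt := rows * w * c
        (st.1 ++ [cnt], st.2.1 ++ [st.2.2], st.2.2 + cnt))
      ([], [], 0) =
    ((PySem.List.pyRange 0 (m : Int) 1).map (fun i => (rows_per + (if i < rem then (1 : Int) else 0)) * w * c),
     (PySem.List.pyRange 0 (m : Int) 1).map (fun i => (i * rows_per + min i rem) * w * c),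
     ((m : Int) * rows_per + min (m : Int) rem) * w * c) := by
  induction m with
  | zero =>
      simp [PySem.List.pyRange_one_eq_nil]
      exact Or.inl (Or.inl hrem)
  | succ k ih =>
      have hstep : PySem.List.pyRange 0 ((k : Int) + 1) 1
          = PySem.List.pyRange 0 (k : Int) 1 ++ [(k : Int)] :=
        PySem.List.pyRange_one_succ_right (by exact_mod_cast Nat.zero_le k)
      push_cast
      rw [hstep, List.foldl_append, ih]
      simp only [List.foldl_cons, List.foldl_nil, List.map_append, List.map_cons, List.map_nil]
      refine Prod.ext rfl (Prod.ext rfl ?_)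
      have h1 : (k : Int) * rows_per + min (k : Int) rem
            + (rows_per + (if (k : Int) < rem then (1 : Int) else 0))
          = ((k : Int) + 1) * rows_per + min ((k : Int) + 1) rem := by
        by_cases h : rem ≤ (k : Int)
        · rw [if_neg (not_lt.mpr h), min_eq_right h, min_eq_right (by omega)]; ring
        · rw [if_pos (not_le.mp h), min_eq_left (le_of_lt (not_le.mp h)), min_eq_left (by omega)]; ring
      calc ((k : Int) * rows_per + min (k : Int) rem) * w * c
            + (rows_per + (if (k : Int) < rem then (1 : Int) else 0)) * w * c
          = ((k : Int) * rows_per + min (k : Int) rem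
              + (rows_per + (if (k : Int) < rem then (1 : Int) else 0))) * w * c := by ring
        _ = (((k : Int) + 1) * rows_per + min ((k : Int) + 1) rem) * w * c := by rw [h1]

-- ===== VERDICT (by name: the statement is the Claim_ definition above) =====
theorem compute_sendcounts_displs_spec : Claim_equal_compute_sendcounts_displs := by
  intro height width nproc channels _ hpre
  unfold Spec_compute_sendcounts_displs compute_sendcounts_displs compute_sendcounts_displs_alt
  by_cases hn : nproc ≤ 0
  · -- empty range: both sides are ([], [])
    simp [PySem.List.pyRange_one_eq_nil hn]
  · have hn : 0 < nproc := not_le.mp hn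
    -- nproc > 0: rem = height % nproc ≥ 0; apply the loop invariant at m = nproc.toNat
    have hrem : 0 ≤ PySem.Int.mod height nproc := by
      simpa [PySem.Int.mod] using Int.fmod_nonneg_of_pos height hn
    have hcast : ((nproc.toNat : Int)) = nproc := Int.toNat_of_nonneg (le_of_lt hn)
    have := pv_fold_invariant (PySem.Int.floordiv height nproc) (PySem.Int.mod height nproc)
      width channels hrem nproc.toNat
    rw [hcast] at this
    simp only [this]
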